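-- pv_equiv track=rewrite | github.com/alexbostock/gsa-ultra | 2-d.py | is_super_colourful
-- ===== SOURCE A (Python) =====
-- def is_super_colourful(seq):
--     y = 0
--     r = 0
--     b = 0
--
--     for flower in seq:
--         if flower == 'Y':
--             y += 1
--         elif flower == 'R':
--             r += 1
--         elif flower == 'B':
--             b += 1
--
--     all_present = y > 0 and r > 0 and b > 0
--     no_repeats = y != r and y != b and r != b
--
--     return all_present and no_repeats
-- ===== SOURCE B (Python) =====
-- def is_super_colourful(seq):
--     flowers = sorted(f for f in seq if f in ('B', 'R', 'Y'))
--     runs = []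
--     for f in flowers:
--         if runs and runs[-1][0] == f:
--             runs[-1][1] += 1
--         else:
--             runs.append([f, 1])
--     return len(runs) == 3 and len({n for _, n in runs}) == 3
-- ===== Notes on version B (the rewrite author's own statement) =====
-- stated objective: alternative
-- what changed: Replaced the single counting pass by filter-sort-then-run-length-encode: B sorts the Y/R/B flowers, computes the run lengths of the sorted list, and checks there are exactly three runs with three distinct lengths.
import Mathlib
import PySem

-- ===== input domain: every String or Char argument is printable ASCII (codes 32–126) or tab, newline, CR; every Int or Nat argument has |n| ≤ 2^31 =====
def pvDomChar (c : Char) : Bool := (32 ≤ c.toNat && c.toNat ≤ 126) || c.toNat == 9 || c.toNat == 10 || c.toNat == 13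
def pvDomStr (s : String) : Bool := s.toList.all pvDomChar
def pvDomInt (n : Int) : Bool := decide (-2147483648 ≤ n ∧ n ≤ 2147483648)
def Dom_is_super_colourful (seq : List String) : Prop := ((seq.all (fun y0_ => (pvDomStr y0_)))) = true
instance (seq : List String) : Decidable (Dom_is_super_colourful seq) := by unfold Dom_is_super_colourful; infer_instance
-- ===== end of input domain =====

-- B replaces A's single counting pass by a different algorithm: sort the Y/R/B flowers and run-length-encode the sorted list, requiring exactly three runs of pairwise-distinct lengths; objective: alternative (not faster).


-- ===== PORT A =====
def is_super_colourful (seq : List String) : Bool :=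
  let s := seq.foldl (fun (acc : Int × Int × Int) flower =>
    if flower == "Y" then (acc.1 + 1, acc.2.1, acc.2.2)
    else if flower == "R" then (acc.1, acc.2.1 + 1, acc.2.2)
    else if flower == "B" then (acc.1, acc.2.1, acc.2.2 + 1)
    else acc) (0, 0, 0)
  let y := s.1; let r := s.2.1; let b := s.2.2
  let all_present := y > 0 && r > 0 && b > 0
  let no_repeats := y != r && y != b && r != b
  all_present && no_repeats

-- ===== PORT B =====
-- body of B's run-length loop; 'runs' is kept in REVERSED order, so Python's runs[-1] is the head
def pvStep (racc : List (String × Int)) (f : String) : List (String × Int) :=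
  match racc with
  | (g, n) :: t => if g == f then (g, n + 1) :: t else (f, 1) :: (g, n) :: t
  | [] => [(f, 1)]

def is_super_colourful_alt (seq : List String) : Bool :=
  let flowers := PySem.List.sorted (seq.filter (fun f => f == "B" || f == "R" || f == "Y")) (fun x => x) false
  let runs := (flowers.foldl pvStep []).reverse
  runs.length == 3 && (PySem.Set.ofList (runs.map (·.2))).length == 3

-- ===== PRECONDITION & SPEC =====
def Spec_is_super_colourful (seq : List String) (out : Bool) : Prop := out = is_super_colourful_alt seq
instance (seq : List String) (out : Bool) : Decidable (Spec_is_super_colourful seq out) := by unfold Spec_is_super_colourful; infer_instance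

-- ===== CLAIM (what is proved, stated in full; the proofs are below) =====
def Claim_equal_is_super_colourful : Prop := ∀ (seq : List String), Dom_is_super_colourful seq → Spec_is_super_colourful seq (is_super_colourful seq)

-- ===== LEMMAS AND PROOFS =====
theorem foldl_counts (seq : List String) (a : Int × Int × Int) :
    seq.foldl (fun (acc : Int × Int × Int) flower =>
      if flower == "Y" then (acc.1 + 1, acc.2.1, acc.2.2)
      else if flower == "R" then (acc.1, acc.2.1 + 1, acc.2.2)
      else if flower == "B" then (acc.1, acc.2.1, acc.2.2 + 1)
      else acc) a
    = (a.1 + (seq.count "Y" : Int), a.2.1 + (seq.count "R" : Int), a.2.2 + (seq.count "B" : Int)) := by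
  induction seq generalizing a with
  | nil => simp
  | cons x xs ih =>
    simp only [List.foldl_cons, ih, List.count_cons]
    by_cases hy : x = "Y"
    · subst hy; simp; omega
    · by_cases hr : x = "R"
      · subst hr; simp; omega
      · by_cases hb : x = "B"
        · subst hb; simp; omega
        · simp [hy, hr, hb]

theorem strBY : ("B" : String) ≤ "Y" := by rw [String.le_iff_toList_le]; decide
theorem strBR : ("B" : String) ≤ "R" := by rw [String.le_iff_toList_le]; decide
theorem strRY : ("R" : String) ≤ "Y" := by rw [String.le_iff_toList_le]; decide

theorem sorted_filter_eq (seq : List String) :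
    PySem.List.sorted (seq.filter (fun f => f == "B" || f == "R" || f == "Y")) (fun x => x) false
    = List.replicate (seq.count "B") "B" ++ List.replicate (seq.count "R") "R"
      ++ List.replicate (seq.count "Y") "Y" := by
  apply PySem.List.sorted_id_eq_of_perm_of_pairwise
  · rw [List.perm_iff_count]
    intro a
    by_cases hB : a = "B"
    · subst hB; simp [List.count_filter, List.count_replicate]
    · by_cases hR : a = "R"
      · subst hR; simp [List.count_filter, List.count_replicate]
      · by_cases hY : a = "Y"
        · subst hY; simp [List.count_filter, List.count_replicate]
        · rw [List.count_eq_zero.mpr (by simp [hB, hR, hY]), eq_comm, List.count_eq_zero]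
          simp [hB, hR, hY]
  · simp only [List.pairwise_append, List.pairwise_replicate, List.mem_append, List.mem_replicate]
    refine ⟨⟨by simp, by simp, ?_⟩, by simp, ?_⟩
    · rintro x ⟨_, rfl⟩ y ⟨_, rfl⟩
      exact strBR
    · rintro x (⟨_, rfl⟩ | ⟨_, rfl⟩) y ⟨_, rfl⟩
      · exact strBY
      · exact strRY

theorem foldl_pvStep_replicate (n : Nat) (f : String) (m : Int) (t : List (String × Int)) :
    List.foldl pvStep ((f, m) :: t) (List.replicate n f) = (f, m + n) :: t := by
  induction n generalizing m with
  | zero => simp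
  | succ k ih =>
    rw [List.replicate_succ, List.foldl_cons]
    simp only [pvStep, BEq.rfl, if_true]
    rw [ih]
    congr 1
    push_cast
    ring_nf

theorem foldl_pvStep_fresh (n : Nat) (f : String) (racc : List (String × Int))
    (h : ∀ g m t, racc = (g, m) :: t → g ≠ f) :
    List.foldl pvStep racc (List.replicate n f)
    = (if n = 0 then racc else (f, (n : Int)) :: racc) := by
  cases n with
  | zero => simp
  | succ k =>
    rw [List.replicate_succ, List.foldl_cons]
    have hstep : pvStep racc f = (f, 1) :: racc := by
      cases racc with
      | nil => rfl
      | cons p t =>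
        obtain ⟨g, m⟩ := p
        have := h g m t rfl
        simp [pvStep, this]
    rw [hstep, foldl_pvStep_replicate]
    simp
    ring_nf

theorem set3_len (a b c : Int) :
    (((PySem.Set.ofList [a, b, c]).length == 3) : Bool)
    = (decide (a ≠ b) && decide (a ≠ c) && decide (b ≠ c)) := by
  simp [PySem.Set.ofList, PySem.Set.add, PySem.Set.contains]
  split_ifs <;> simp_all <;> omega

theorem ab_eq (seq : List String) : is_super_colourful seq = is_super_colourful_alt seq := by
  unfold is_super_colourful is_super_colourful_alt
  rw [foldl_counts, sorted_filter_eq]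
  simp only [List.foldl_append]
  set b := seq.count "B" with hb'
  set r := seq.count "R" with hr'
  set y := seq.count "Y" with hy'
  rw [foldl_pvStep_fresh b "B" [] (by intro g m t h; simp at h)]
  by_cases hb : b = 0 <;> simp only [hb, if_true, if_false, ite_true, ite_false, if_pos, reduceIte]
  · rw [foldl_pvStep_fresh r "R" [] (by intro g m t h; simp at h)]
    by_cases hr : r = 0 <;> simp only [hr, reduceIte]
    · rw [foldl_pvStep_fresh y "Y" [] (by intro g m t h; simp at h)]
      by_cases hy : y = 0 <;> simp only [hy, reduceIte] <;>
        · rw [Bool.eq_iff_iff]; simp [hb, hr, hy]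
    · rw [foldl_pvStep_fresh y "Y" [("R", (r : Int))] (by intro g m t h; simp at h; rw [← h.1.1]; decide)]
      by_cases hy : y = 0 <;> simp only [hy, reduceIte] <;>
        · rw [Bool.eq_iff_iff]; simp [hb, hr, hy]
  · rw [foldl_pvStep_fresh r "R" [("B", (b : Int))] (by intro g m t h; simp at h; rw [← h.1.1]; decide)]
    by_cases hr : r = 0 <;> simp only [hr, reduceIte]
    · rw [foldl_pvStep_fresh y "Y" [("B", (b : Int))] (by intro g m t h; simp at h; rw [← h.1.1]; decide)]
      by_cases hy : y = 0 <;> simp only [hy, reduceIte] <;>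
        · rw [Bool.eq_iff_iff]; simp [hb, hr, hy]
    · rw [foldl_pvStep_fresh y "Y" [("R", (r : Int)), ("B", (b : Int))] (by intro g m t h; simp at h; rw [← h.1.1]; decide)]
      by_cases hy : y = 0 <;> simp only [hy, reduceIte]
      · rw [Bool.eq_iff_iff]; simp [hb, hr, hy]
      · rw [Bool.eq_iff_iff]
        simp only [List.reverse_cons, List.reverse_nil, List.nil_append, List.cons_append,
          List.map_cons, List.map_nil, List.length_cons, List.length_nil, set3_len]
        simp [hb, hr, hy]
        omega

-- ===== VERDICT (by name: the statement is the Claim_ definition above) =====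
theorem is_super_colourful_spec : Claim_equal_is_super_colourful := by
  intro seq _
  unfold Spec_is_super_colourful
  exact ab_eq seq
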